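-- pv_equiv track=rewrite | github.com/ArielleTolome/AutoResearchClaw | loop/scripts/prediction_scorer.py | score_awareness_match
-- ===== SOURCE A (Python) =====
-- def score_awareness_match(copy_text: str, awareness_stage: int) -> tuple[int, str]:
--     """
--     Rule-based awareness match scoring.
--     Checks if copy signals match the declared Schwartz awareness stage.
--     Returns (score 0-5, note).
--     """
--     text_lower = copy_text.lower()
--
--     # Stage 1 (Unaware) — should NOT mention insurance/product, should mention universal desire
--     if awareness_stage == 1:
--         product_mentions = any(w in text_lower for w in ["insurance", "policy", "premium", "quote", "coverage"])
--         universal_desire = any(w in text_lower for w in ["save", "money", "family", "protect", "safe", "stress", "worry", "bills"])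
--         if not product_mentions and universal_desire:
--             return 5, "Correctly avoids product mention for unaware audience"
--         elif product_mentions:
--             return 1, "Stage 1 copy should NOT mention the product category — audience doesn't know they need it yet"
--         else:
--             return 3, "Avoids product but lacks strong universal desire hook"
--
--     # Stage 2 (Problem-aware) — names the pain, no product pitch
--     elif awareness_stage == 2:
--         pain_present = any(w in text_lower for w in ["rate", "expensive", "overcharged", "paying too much", "cant afford", "problem", "struggle", "frustrat"])
--         hard_sell = any(w in text_lower for w in ["buy now", "get a quote", "sign up today", "limited time"])
--         if pain_present and not hard_sell:
--             return 5, "Good — names the problem without jumping to a hard sell"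
--         elif hard_sell:
--             return 2, "Stage 2 copy shouldn't hard-sell — audience isn't solution-aware yet"
--         else:
--             return 3, "Pain mention weak — be more specific about the problem"
--
--     # Stage 3 (Solution-aware) — differentiates mechanism
--     elif awareness_stage == 3:
--         mechanism = any(w in text_lower for w in ["how", "why", "because", "works by", "unlike", "different", "the only", "discover", "new way"])
--         if mechanism:
--             return 5, "Good mechanism differentiation for solution-aware audience"
--         else:
--             return 3, "Stage 3 copy should differentiate the mechanism — why is this solution different?"
--
--     # Stage 4 (Product-aware) — objection handling + proof
--     elif awareness_stage == 4:
--         proof = any(w in text_lower for w in ["proven", "customers", "reviews", "rated", "trusted", "guarantee", "unlike", "compare"])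
--         if proof:
--             return 5, "Good proof/comparison for product-aware audience"
--         else:
--             return 3, "Stage 4 copy should include proof or comparison to address objections"
--
--     # Stage 5 (Most aware) — direct offer
--     elif awareness_stage == 5:
--         urgency = any(w in text_lower for w in ["today", "now", "limited", "expires", "save", "off", "%", "free"])
--         if urgency:
--             return 5, "Good direct offer with urgency for most-aware audience"
--         else:
--             return 3, "Stage 5 copy should have a clear, direct offer with urgency"
--
--     return 3, "Awareness stage not set — unable to evaluate match"
-- ===== SOURCE B (Python) =====
-- # Single-pass fold over one flat (stage, polarity, keyword) rule list with a
-- # (pos, neg) accumulator, then a generic neg-first decision over an outcome table.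
--
-- _P = True   # keyword the stage SHOULD contain
-- _N = False  # keyword the stage should NOT contain
--
-- _RULES = [
--     (1, _N, "insurance"), (1, _N, "policy"), (1, _N, "premium"), (1, _N, "quote"), (1, _N, "coverage"),
--     (1, _P, "save"), (1, _P, "money"), (1, _P, "family"), (1, _P, "protect"),
--     (1, _P, "safe"), (1, _P, "stress"), (1, _P, "worry"), (1, _P, "bills"),
--     (2, _P, "rate"), (2, _P, "expensive"), (2, _P, "overcharged"), (2, _P, "paying too much"),
--     (2, _P, "cant afford"), (2, _P, "problem"), (2, _P, "struggle"), (2, _P, "frustrat"),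
--     (2, _N, "buy now"), (2, _N, "get a quote"), (2, _N, "sign up today"), (2, _N, "limited time"),
--     (3, _P, "how"), (3, _P, "why"), (3, _P, "because"), (3, _P, "works by"), (3, _P, "unlike"),
--     (3, _P, "different"), (3, _P, "the only"), (3, _P, "discover"), (3, _P, "new way"),
--     (4, _P, "proven"), (4, _P, "customers"), (4, _P, "reviews"), (4, _P, "rated"),
--     (4, _P, "trusted"), (4, _P, "guarantee"), (4, _P, "unlike"), (4, _P, "compare"),
--     (5, _P, "today"), (5, _P, "now"), (5, _P, "limited"), (5, _P, "expires"),
--     (5, _P, "save"), (5, _P, "off"), (5, _P, "%"), (5, _P, "free"),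
-- ]
--
-- _OUTCOMES = {
--     1: ((5, "Correctly avoids product mention for unaware audience"),
--         (1, "Stage 1 copy should NOT mention the product category — audience doesn't know they need it yet"),
--         (3, "Avoids product but lacks strong universal desire hook")),
--     2: ((5, "Good — names the problem without jumping to a hard sell"),
--         (2, "Stage 2 copy shouldn't hard-sell — audience isn't solution-aware yet"),
--         (3, "Pain mention weak — be more specific about the problem")),
--     3: ((5, "Good mechanism differentiation for solution-aware audience"),
--         (3, "Stage 3 copy should differentiate the mechanism — why is this solution different?"),
--         (3, "Stage 3 copy should differentiate the mechanism — why is this solution different?")),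
--     4: ((5, "Good proof/comparison for product-aware audience"),
--         (3, "Stage 4 copy should include proof or comparison to address objections"),
--         (3, "Stage 4 copy should include proof or comparison to address objections")),
--     5: ((5, "Good direct offer with urgency for most-aware audience"),
--         (3, "Stage 5 copy should have a clear, direct offer with urgency"),
--         (3, "Stage 5 copy should have a clear, direct offer with urgency")),
-- }
--
--
-- def score_awareness_match(copy_text: str, awareness_stage: int) -> tuple[int, str]:
--     text = copy_text.lower()
--     pos = neg = False
--     for stage, is_positive, kw in _RULES:
--         if stage == awareness_stage and kw in text:
--             if is_positive:
--                 pos = True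
--             else:
--                 neg = True
--     outcome = _OUTCOMES.get(awareness_stage)
--     if outcome is None:
--         return 3, "Awareness stage not set — unable to evaluate match"
--     good, bad, other = outcome
--     if neg:
--         return bad
--     if pos:
--         return good
--     return other
-- ===== Notes on version B (the rewrite author's own statement) =====
-- stated objective: alternative
-- what changed: Replaced A's five independent stage branches, each with its own pair of any()-scans and its own if/elif chain, by a single fold over one flat (stage, polarity, keyword) rule list accumulating (pos, neg) flags, followed by one generic neg-first decision against an outcome table.
import Mathlib
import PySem

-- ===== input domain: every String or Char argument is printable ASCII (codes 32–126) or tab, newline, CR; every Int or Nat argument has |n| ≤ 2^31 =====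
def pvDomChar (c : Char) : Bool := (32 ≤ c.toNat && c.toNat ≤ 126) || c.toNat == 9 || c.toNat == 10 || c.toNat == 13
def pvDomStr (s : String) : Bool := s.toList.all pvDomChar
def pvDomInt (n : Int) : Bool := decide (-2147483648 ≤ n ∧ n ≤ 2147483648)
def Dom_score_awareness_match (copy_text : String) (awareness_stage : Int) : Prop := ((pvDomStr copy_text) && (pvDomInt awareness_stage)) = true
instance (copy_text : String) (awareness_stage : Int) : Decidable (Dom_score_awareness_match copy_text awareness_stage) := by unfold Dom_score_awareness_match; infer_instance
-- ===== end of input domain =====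

-- B replaces A's five independent stage branches by one fold over a flat (stage, polarity, keyword)
-- rule list accumulating (pos, neg) flags, then one generic neg-first decision (objective: alternative).

-- ===== PORT A =====
def score_awareness_match (copy_text : String) (awareness_stage : Int) : Int × String :=
  let text_lower := PySem.Str.lower copy_text
  if awareness_stage == 1 then
    let product_mentions := ["insurance", "policy", "premium", "quote", "coverage"].any (fun w => PySem.Str.isIn w text_lower)
    let universal_desire := ["save", "money", "family", "protect", "safe", "stress", "worry", "bills"].any (fun w => PySem.Str.isIn w text_lower)
    if !product_mentions && universal_desire then
      (5, "Correctly avoids product mention for unaware audience")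
    else if product_mentions then
      (1, "Stage 1 copy should NOT mention the product category — audience doesn't know they need it yet")
    else
      (3, "Avoids product but lacks strong universal desire hook")
  else if awareness_stage == 2 then
    let pain_present := ["rate", "expensive", "overcharged", "paying too much", "cant afford", "problem", "struggle", "frustrat"].any (fun w => PySem.Str.isIn w text_lower)
    let hard_sell := ["buy now", "get a quote", "sign up today", "limited time"].any (fun w => PySem.Str.isIn w text_lower)
    if pain_present && !hard_sell then
      (5, "Good — names the problem without jumping to a hard sell")
    else if hard_sell then
      (2, "Stage 2 copy shouldn't hard-sell — audience isn't solution-aware yet")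
    else
      (3, "Pain mention weak — be more specific about the problem")
  else if awareness_stage == 3 then
    let mechanism := ["how", "why", "because", "works by", "unlike", "different", "the only", "discover", "new way"].any (fun w => PySem.Str.isIn w text_lower)
    if mechanism then
      (5, "Good mechanism differentiation for solution-aware audience")
    else
      (3, "Stage 3 copy should differentiate the mechanism — why is this solution different?")
  else if awareness_stage == 4 then
    let proof_ := ["proven", "customers", "reviews", "rated", "trusted", "guarantee", "unlike", "compare"].any (fun w => PySem.Str.isIn w text_lower)
    if proof_ then
      (5, "Good proof/comparison for product-aware audience")
    else
      (3, "Stage 4 copy should include proof or comparison to address objections")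
  else if awareness_stage == 5 then
    let urgency := ["today", "now", "limited", "expires", "save", "off", "%", "free"].any (fun w => PySem.Str.isIn w text_lower)
    if urgency then
      (5, "Good direct offer with urgency for most-aware audience")
    else
      (3, "Stage 5 copy should have a clear, direct offer with urgency")
  else
    (3, "Awareness stage not set — unable to evaluate match")

-- ===== PORT B =====
-- flat rule list: (stage, is_positive, keyword)
def pvRules : List (Int × Bool × String) :=
  [ (1, false, "insurance"), (1, false, "policy"), (1, false, "premium"), (1, false, "quote"), (1, false, "coverage"),
    (1, true, "save"), (1, true, "money"), (1, true, "family"), (1, true, "protect"),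
    (1, true, "safe"), (1, true, "stress"), (1, true, "worry"), (1, true, "bills"),
    (2, true, "rate"), (2, true, "expensive"), (2, true, "overcharged"), (2, true, "paying too much"),
    (2, true, "cant afford"), (2, true, "problem"), (2, true, "struggle"), (2, true, "frustrat"),
    (2, false, "buy now"), (2, false, "get a quote"), (2, false, "sign up today"), (2, false, "limited time"),
    (3, true, "how"), (3, true, "why"), (3, true, "because"), (3, true, "works by"), (3, true, "unlike"),
    (3, true, "different"), (3, true, "the only"), (3, true, "discover"), (3, true, "new way"),
    (4, true, "proven"), (4, true, "customers"), (4, true, "reviews"), (4, true, "rated"),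
    (4, true, "trusted"), (4, true, "guarantee"), (4, true, "unlike"), (4, true, "compare"),
    (5, true, "today"), (5, true, "now"), (5, true, "limited"), (5, true, "expires"),
    (5, true, "save"), (5, true, "off"), (5, true, "%"), (5, true, "free") ]

-- outcome table: stage ↦ (good, bad, other)
def pvOutcomes : PySem.Dict Int ((Int × String) × (Int × String) × (Int × String)) :=
  PySem.Dict.ofList
  [ (1, ((5, "Correctly avoids product mention for unaware audience"),
         (1, "Stage 1 copy should NOT mention the product category — audience doesn't know they need it yet"),
         (3, "Avoids product but lacks strong universal desire hook"))),
    (2, ((5, "Good — names the problem without jumping to a hard sell"),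
         (2, "Stage 2 copy shouldn't hard-sell — audience isn't solution-aware yet"),
         (3, "Pain mention weak — be more specific about the problem"))),
    (3, ((5, "Good mechanism differentiation for solution-aware audience"),
         (3, "Stage 3 copy should differentiate the mechanism — why is this solution different?"),
         (3, "Stage 3 copy should differentiate the mechanism — why is this solution different?"))),
    (4, ((5, "Good proof/comparison for product-aware audience"),
         (3, "Stage 4 copy should include proof or comparison to address objections"),
         (3, "Stage 4 copy should include proof or comparison to address objections"))),
    (5, ((5, "Good direct offer with urgency for most-aware audience"),
         (3, "Stage 5 copy should have a clear, direct offer with urgency"),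
         (3, "Stage 5 copy should have a clear, direct offer with urgency"))) ]

def pvStep (awareness_stage : Int) (text : String) (s : Bool × Bool) (r : Int × Bool × String) : Bool × Bool :=
  if r.1 == awareness_stage && PySem.Str.isIn r.2.2 text then
    (if r.2.1 then (true, s.2) else (s.1, true))
  else s

def score_awareness_match_alt (copy_text : String) (awareness_stage : Int) : Int × String :=
  let text := PySem.Str.lower copy_text
  let flags := pvRules.foldl (pvStep awareness_stage text) (false, false)
  match PySem.Dict.get? pvOutcomes awareness_stage with
  | none => (3, "Awareness stage not set — unable to evaluate match")
  | some (good, bad, other) =>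
    if flags.2 then bad
    else if flags.1 then good
    else other

-- ===== PRECONDITION & SPEC =====
def Spec_score_awareness_match (copy_text : String) (awareness_stage : Int) (out : Int × String) : Prop := out = score_awareness_match_alt copy_text awareness_stage
instance (copy_text : String) (awareness_stage : Int) (out : Int × String) : Decidable (Spec_score_awareness_match copy_text awareness_stage out) := by unfold Spec_score_awareness_match; infer_instance

-- ===== CLAIM (what is proved, stated in full; the proofs are below) =====
def Claim_equal_score_awareness_match : Prop := ∀ (copy_text : String) (awareness_stage : Int), Dom_score_awareness_match copy_text awareness_stage → Spec_score_awareness_match copy_text awareness_stage (score_awareness_match copy_text awareness_stage)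

-- ===== LEMMAS AND PROOFS =====

-- the fold computes exactly "some positive rule of this stage matches" / "some negative rule matches"
theorem pvFold_char (st : Int) (text : String) (rules : List (Int × Bool × String)) (p n : Bool) :
    rules.foldl (pvStep st text) (p, n) =
      (p || rules.any (fun r => r.1 == st && r.2.1 && PySem.Str.isIn r.2.2 text),
       n || rules.any (fun r => r.1 == st && !r.2.1 && PySem.Str.isIn r.2.2 text)) := by
  induction rules generalizing p n with
  | nil => simp
  | cons r rs ih =>
    obtain ⟨s, b, w⟩ := r
    simp only [List.foldl_cons, List.any_cons, pvStep]
    cases hs : (s == st) <;> cases hi : PySem.Str.isIn w text <;> cases b <;>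
      simp only [hs, hi, ih, Bool.and_true, Bool.and_false, Bool.not_true, Bool.not_false,
        Bool.true_or, Bool.false_or, Bool.or_true, reduceIte] <;> cases p <;> cases n <;> rfl

-- the flat rule list filtered to one stage/polarity is exactly A's keyword scan
theorem pvAny_pos_1 (t : String) : (pvRules.any fun r => r.1 == (1 : Int) && r.2.1 && PySem.Str.isIn r.2.2 t)
    = ["save", "money", "family", "protect", "safe", "stress", "worry", "bills"].any (fun w => PySem.Str.isIn w t) := by
  simp [pvRules]

theorem pvAny_neg_1 (t : String) : (pvRules.any fun r => r.1 == (1 : Int) && !r.2.1 && PySem.Str.isIn r.2.2 t)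
    = ["insurance", "policy", "premium", "quote", "coverage"].any (fun w => PySem.Str.isIn w t) := by
  simp [pvRules]

theorem pvAny_pos_2 (t : String) : (pvRules.any fun r => r.1 == (2 : Int) && r.2.1 && PySem.Str.isIn r.2.2 t)
    = ["rate", "expensive", "overcharged", "paying too much", "cant afford", "problem", "struggle", "frustrat"].any (fun w => PySem.Str.isIn w t) := by
  simp [pvRules]

theorem pvAny_neg_2 (t : String) : (pvRules.any fun r => r.1 == (2 : Int) && !r.2.1 && PySem.Str.isIn r.2.2 t)
    = ["buy now", "get a quote", "sign up today", "limited time"].any (fun w => PySem.Str.isIn w t) := by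
  simp [pvRules]

theorem pvAny_pos_3 (t : String) : (pvRules.any fun r => r.1 == (3 : Int) && r.2.1 && PySem.Str.isIn r.2.2 t)
    = ["how", "why", "because", "works by", "unlike", "different", "the only", "discover", "new way"].any (fun w => PySem.Str.isIn w t) := by
  simp [pvRules]

theorem pvAny_neg_3 (t : String) : (pvRules.any fun r => r.1 == (3 : Int) && !r.2.1 && PySem.Str.isIn r.2.2 t) = false := by
  simp [pvRules]

theorem pvAny_pos_4 (t : String) : (pvRules.any fun r => r.1 == (4 : Int) && r.2.1 && PySem.Str.isIn r.2.2 t)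
    = ["proven", "customers", "reviews", "rated", "trusted", "guarantee", "unlike", "compare"].any (fun w => PySem.Str.isIn w t) := by
  simp [pvRules]

theorem pvAny_neg_4 (t : String) : (pvRules.any fun r => r.1 == (4 : Int) && !r.2.1 && PySem.Str.isIn r.2.2 t) = false := by
  simp [pvRules]

theorem pvAny_pos_5 (t : String) : (pvRules.any fun r => r.1 == (5 : Int) && r.2.1 && PySem.Str.isIn r.2.2 t)
    = ["today", "now", "limited", "expires", "save", "off", "%", "free"].any (fun w => PySem.Str.isIn w t) := by
  simp [pvRules]

theorem pvAny_neg_5 (t : String) : (pvRules.any fun r => r.1 == (5 : Int) && !r.2.1 && PySem.Str.isIn r.2.2 t) = false := by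
  simp [pvRules]

theorem pvOutcomes_get_1 : PySem.Dict.get? pvOutcomes 1 = some
  ((5, "Correctly avoids product mention for unaware audience"),
   (1, "Stage 1 copy should NOT mention the product category — audience doesn't know they need it yet"),
   (3, "Avoids product but lacks strong universal desire hook")) := by decide

theorem pvOutcomes_get_2 : PySem.Dict.get? pvOutcomes 2 = some
  ((5, "Good — names the problem without jumping to a hard sell"),
   (2, "Stage 2 copy shouldn't hard-sell — audience isn't solution-aware yet"),
   (3, "Pain mention weak — be more specific about the problem")) := by decide

theorem pvOutcomes_get_3 : PySem.Dict.get? pvOutcomes 3 = some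
  ((5, "Good mechanism differentiation for solution-aware audience"),
   (3, "Stage 3 copy should differentiate the mechanism — why is this solution different?"),
   (3, "Stage 3 copy should differentiate the mechanism — why is this solution different?")) := by decide

theorem pvOutcomes_get_4 : PySem.Dict.get? pvOutcomes 4 = some
  ((5, "Good proof/comparison for product-aware audience"),
   (3, "Stage 4 copy should include proof or comparison to address objections"),
   (3, "Stage 4 copy should include proof or comparison to address objections")) := by decide

theorem pvOutcomes_get_5 : PySem.Dict.get? pvOutcomes 5 = some
  ((5, "Good direct offer with urgency for most-aware audience"),
   (3, "Stage 5 copy should have a clear, direct offer with urgency"),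
   (3, "Stage 5 copy should have a clear, direct offer with urgency")) := by decide

theorem pvOutcomes_keys : pvOutcomes.keys = [1, 2, 3, 4, 5] := by decide

theorem score_awareness_match_eq_alt (copy_text : String) (awareness_stage : Int) :
    score_awareness_match copy_text awareness_stage = score_awareness_match_alt copy_text awareness_stage := by
  by_cases h1 : awareness_stage = 1
  · subst h1
    simp only [score_awareness_match, score_awareness_match_alt, pvFold_char,
      pvAny_pos_1, pvAny_neg_1, pvOutcomes_get_1, Bool.false_or]
    cases hn : ["insurance", "policy", "premium", "quote", "coverage"].any (fun w => PySem.Str.isIn w (PySem.Str.lower copy_text)) <;>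
    cases hp : ["save", "money", "family", "protect", "safe", "stress", "worry", "bills"].any (fun w => PySem.Str.isIn w (PySem.Str.lower copy_text)) <;>
      simp [hn]
  · by_cases h2 : awareness_stage = 2
    · subst h2
      simp only [score_awareness_match, score_awareness_match_alt, pvFold_char,
        pvAny_pos_2, pvAny_neg_2, pvOutcomes_get_2, Bool.false_or]
      cases hn : ["buy now", "get a quote", "sign up today", "limited time"].any (fun w => PySem.Str.isIn w (PySem.Str.lower copy_text)) <;>
      cases hp : ["rate", "expensive", "overcharged", "paying too much", "cant afford", "problem", "struggle", "frustrat"].any (fun w => PySem.Str.isIn w (PySem.Str.lower copy_text)) <;>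
        simp [hn]
    · by_cases h3 : awareness_stage = 3
      · subst h3
        simp only [score_awareness_match, score_awareness_match_alt, pvFold_char,
          pvAny_pos_3, pvAny_neg_3, pvOutcomes_get_3, Bool.false_or]
        cases hp : ["how", "why", "because", "works by", "unlike", "different", "the only", "discover", "new way"].any (fun w => PySem.Str.isIn w (PySem.Str.lower copy_text)) <;>
          simp [hp]
      · by_cases h4 : awareness_stage = 4
        · subst h4
          simp only [score_awareness_match, score_awareness_match_alt, pvFold_char,
            pvAny_pos_4, pvAny_neg_4, pvOutcomes_get_4, Bool.false_or]
          cases hp : ["proven", "customers", "reviews", "rated", "trusted", "guarantee", "unlike", "compare"].any (fun w => PySem.Str.isIn w (PySem.Str.lower copy_text)) <;>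
            simp [hp]
        · by_cases h5 : awareness_stage = 5
          · subst h5
            simp only [score_awareness_match, score_awareness_match_alt, pvFold_char,
              pvAny_pos_5, pvAny_neg_5, pvOutcomes_get_5, Bool.false_or]
            cases hp : ["today", "now", "limited", "expires", "save", "off", "%", "free"].any (fun w => PySem.Str.isIn w (PySem.Str.lower copy_text)) <;>
              simp [hp]
          · have hnone : PySem.Dict.get? pvOutcomes awareness_stage = none := by
              rw [PySem.Dict.get?_eq_none_iff_not_mem_keys, pvOutcomes_keys]
              simp [h1, h2, h3, h4, h5]
            simp [score_awareness_match, score_awareness_match_alt, hnone, h1, h2, h3, h4, h5]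

-- ===== VERDICT (by name: the statement is the Claim_ definition above) =====
theorem score_awareness_match_spec : Claim_equal_score_awareness_match := by
  intro copy_text awareness_stage _
  exact score_awareness_match_eq_alt copy_text awareness_stage
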